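-- pv_equiv track=rewrite | github.com/jrbat76/DynamicTradeModel | transformation.py | ttlCount
-- ===== SOURCE A (Python) =====
-- def ttlCount(dictionary):
--
-- 	count = 0
-- 	ttl_elements = 0
--
-- 	while ttl_elements < len(list(dictionary)):
-- 		for index, list_of_country in dictionary.items():
-- 			each_count = len(list_of_country)
-- 			ttl_elements += each_count
-- 			count += 1
-- 	return ttl_elements
-- ===== SOURCE B (Python) =====
-- def ttlCount(dictionary):
--     n = len(dictionary)
--     S = sum(len(v) for v in dictionary.values())
--     count = 0
--     ttl_elements = 0
--     while ttl_elements < n: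
--         ttl_elements += S
--         count += n
--     return ttl_elements
-- ===== Notes on version B (the rewrite author's own statement) =====
-- stated objective: simpler
-- what changed: Precomputes the per-pass increment S = sum of value-list lengths once and replaces the repeated inner scan over the dict entries with a single scalar while-loop adding S per pass.
import Mathlib
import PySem

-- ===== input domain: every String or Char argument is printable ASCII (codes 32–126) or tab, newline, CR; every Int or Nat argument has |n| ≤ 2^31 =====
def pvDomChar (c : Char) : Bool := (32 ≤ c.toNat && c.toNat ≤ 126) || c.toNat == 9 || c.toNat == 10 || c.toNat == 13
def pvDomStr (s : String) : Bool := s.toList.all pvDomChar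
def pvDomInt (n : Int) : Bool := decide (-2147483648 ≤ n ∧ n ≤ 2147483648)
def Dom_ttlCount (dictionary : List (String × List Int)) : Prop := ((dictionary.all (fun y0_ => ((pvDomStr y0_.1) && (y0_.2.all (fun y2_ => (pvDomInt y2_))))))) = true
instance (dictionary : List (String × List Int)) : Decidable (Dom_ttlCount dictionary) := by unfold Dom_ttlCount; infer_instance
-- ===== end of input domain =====

-- B hoists the per-pass total S out of the while loop and runs a scalar loop, instead of
-- re-scanning every dict entry on each pass (objective: simpler).

-- ===== PORT A =====
-- A's while loop, one recursive step per pass; fuel makes the recursion total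
-- (where Python A returns, the loop makes at most `length` passes, so fuel `length+1` is ample;
--  on inputs where Python's loop spins forever — a non-empty dict with all-empty lists — Python
--  never returns, so nothing is claimed about its value there).
def ttlCountLoop (dictionary : List (String × List Int)) (count ttl : Int) (fuel : Nat) : Int :=
  match fuel with
  | 0 => ttl
  | f + 1 =>
    if ttl < (dictionary.length : Int) then
      -- inner `for index, list_of_country in dictionary.items()`
      let st := dictionary.foldl
        (fun (p : Int × Int) kv => (p.1 + 1, p.2 + (kv.2.length : Int))) (count, ttl)
      ttlCountLoop dictionary st.1 st.2 f
    else ttl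

def ttlCount (dictionary : List (String × List Int)) : Int :=
  ttlCountLoop dictionary 0 0 (dictionary.length + 1)

-- ===== PORT B =====
-- scalar while loop `ttl += S; count += n`, with the same fuel bound on passes
def ttlAltLoop (n S ttl count : Int) (fuel : Nat) : Int :=
  match fuel with
  | 0 => ttl
  | f + 1 => if ttl < n then ttlAltLoop n S (ttl + S) (count + n) f else ttl

def ttlCount_alt (dictionary : List (String × List Int)) : Int :=
  let n : Int := dictionary.length
  let S : Int := dictionary.foldl (fun a kv => a + (kv.2.length : Int)) 0
  ttlAltLoop n S 0 0 (dictionary.length + 1)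

-- ===== PRECONDITION & SPEC =====
def Spec_ttlCount (dictionary : List (String × List Int)) (out : Int) : Prop := out = ttlCount_alt dictionary
instance (dictionary : List (String × List Int)) (out : Int) : Decidable (Spec_ttlCount dictionary out) := by unfold Spec_ttlCount; infer_instance

-- ===== CLAIM (what is proved, stated in full; the proofs are below) =====
def Claim_equal_ttlCount : Prop := ∀ (dictionary : List (String × List Int)), Dom_ttlCount dictionary → Spec_ttlCount dictionary (ttlCount dictionary)

-- ===== LEMMAS AND PROOFS =====

-- shifting the init of B's sum fold
lemma ttl_sum_shift (d : List (String × List Int)) (s : Int) :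
    d.foldl (fun a kv => a + (kv.2.length : Int)) s
      = s + d.foldl (fun a kv => a + (kv.2.length : Int)) 0 := by
  induction d generalizing s with
  | nil => simp
  | cons kv tl ih =>
    simp only [List.foldl_cons]
    rw [ih (s + kv.2.length), ih ((0 : Int) + kv.2.length)]
    ring

-- A's inner pass adds `length` to count and S to ttl
lemma ttl_pass (d : List (String × List Int)) (c t : Int) :
    d.foldl (fun (p : Int × Int) kv => (p.1 + 1, p.2 + (kv.2.length : Int))) (c, t)
      = (c + d.length, t + d.foldl (fun a kv => a + (kv.2.length : Int)) 0) := by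
  induction d generalizing c t with
  | nil => simp
  | cons kv tl ih =>
    simp only [List.foldl_cons, ih, List.length_cons]
    rw [ttl_sum_shift tl ((0 : Int) + kv.2.length)]
    refine Prod.ext ?_ ?_ <;> simp <;> ring

-- the two loops compute the same ttl, whatever the (unused) counters are
lemma ttl_loops_eq (d : List (String × List Int)) (fuel : Nat) :
    ∀ (c t c' : Int),
      ttlCountLoop d c t fuel
        = ttlAltLoop (d.length : Int) (d.foldl (fun a kv => a + (kv.2.length : Int)) 0) t c' fuel := by
  induction fuel with
  | zero => intro c t c'; rfl
  | succ f ih =>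
    intro c t c'
    simp only [ttlCountLoop, ttlAltLoop, ttl_pass]
    split_ifs with h
    · exact ih _ _ _
    · rfl

-- ===== VERDICT (by name: the statement is the Claim_ definition above) =====
theorem ttlCount_spec : Claim_equal_ttlCount := by
  intro d _
  unfold Spec_ttlCount ttlCount ttlCount_alt
  exact ttl_loops_eq d (d.length + 1) 0 0 0
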